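-- pv_equiv track=rewrite | github.com/swchoi1997/algorithm | BAEKJOON/2512.py | monsplit
-- ===== SOURCE A (Python) =====
-- def monsplit(mon, m, start, end):
--     while start <= end:
--         mid = (start + end) // 2
--
--         totalmoney = 0
--         for i in mon:
--             totalmoney += min(i, mid)
--
--         if m >= totalmoney:
--             start = mid + 1
--         else:
--             end = mid - 1
--     return end
-- ===== SOURCE B (Python) =====
-- def monsplit(mon, m, start, end):
--     # sort once + prefix sums; each capped-sum query answered by hand-written
--     # bisect_right in O(log n) instead of a full O(n) scan
--     xs = sorted(mon)
--     n = len(xs)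
--     prefix = [0]
--     s = 0
--     for x in xs:
--         s += x
--         prefix.append(s)
--     while start <= end:
--         mid = (start + end) // 2
--         lo, hi = 0, n
--         while lo < hi:
--             h = (lo + hi) // 2
--             if xs[h] <= mid:
--                 lo = h + 1
--             else:
--                 hi = h
--         total = prefix[lo] + (n - lo) * mid
--         if m >= total:
--             start = mid + 1
--         else:
--             end = mid - 1
--     return end
-- ===== Notes on version B (the rewrite author's own statement) =====
-- stated objective: faster
-- what changed: B sorts the list once and builds prefix sums, then answers each binary-search probe's capped sum with a bisect over the sorted list instead of rescanning all monasteries.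
import Mathlib
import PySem

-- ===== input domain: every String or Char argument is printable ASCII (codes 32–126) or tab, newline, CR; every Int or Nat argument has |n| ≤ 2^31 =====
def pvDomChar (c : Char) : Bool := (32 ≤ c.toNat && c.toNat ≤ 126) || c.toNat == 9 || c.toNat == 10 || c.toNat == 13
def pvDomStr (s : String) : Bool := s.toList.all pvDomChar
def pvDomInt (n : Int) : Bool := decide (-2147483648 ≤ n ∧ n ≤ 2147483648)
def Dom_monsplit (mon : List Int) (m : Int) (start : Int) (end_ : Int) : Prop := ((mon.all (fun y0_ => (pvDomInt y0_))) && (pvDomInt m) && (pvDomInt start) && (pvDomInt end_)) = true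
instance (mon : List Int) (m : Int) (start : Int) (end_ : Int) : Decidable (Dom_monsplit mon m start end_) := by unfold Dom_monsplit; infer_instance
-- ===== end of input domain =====

-- B replaces A's O(n) rescan at every binary-search probe by sort-once + prefix sums + bisect.

-- ===== PORT A =====
-- the while loop of A, step for step
def monsplitGo (mon : List Int) (m : Int) (start : Int) (end_ : Int) : Int :=
  if h : start ≤ end_ then
    let mid := PySem.Int.floordiv (start + end_) 2
    let totalmoney := mon.foldl (fun t i => t + min i mid) 0
    if m ≥ totalmoney then monsplitGo mon m (mid + 1) end_
    else monsplitGo mon m start (mid - 1)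
  else end_
termination_by (end_ + 1 - start).toNat
decreasing_by
  · have := PySem.Int.floordiv_two_mid_bounds h; omega
  · have := PySem.Int.floordiv_two_mid_bounds h; omega

def monsplit (mon : List Int) (m : Int) (start : Int) (end_ : Int) : Int :=
  monsplitGo mon m start end_

-- ===== PORT B =====
-- the inner 'while lo < hi' bisect loop of B; indices are always in range, so
-- xs[h] is ported as getD h 0 (exact: 0 ≤ h < hi ≤ len xs throughout)
def bisectGo (xs : List Int) (mid : Int) (lo hi : Nat) : Nat :=
  if lo < hi then
    let h := (lo + hi) / 2
    if xs.getD h 0 ≤ mid then bisectGo xs mid (h + 1) hi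
    else bisectGo xs mid lo h
  else lo
termination_by hi - lo
decreasing_by all_goals omega

-- the 'for x in xs' prefix-sum loop of B
def prefixSums (xs : List Int) : List Int :=
  (xs.foldl (fun (p : List Int × Int) x => (p.1 ++ [p.2 + x], p.2 + x)) ([0], 0)).1

-- the while loop of B
def monsplitAltGo (xs prefix_ : List Int) (n : Nat) (m : Int) (start : Int) (end_ : Int) : Int :=
  if h : start ≤ end_ then
    let mid := PySem.Int.floordiv (start + end_) 2
    let lo := bisectGo xs mid 0 n
    let total := prefix_.getD lo 0 + ((n : Int) - (lo : Int)) * mid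
    if m ≥ total then monsplitAltGo xs prefix_ n m (mid + 1) end_
    else monsplitAltGo xs prefix_ n m start (mid - 1)
  else end_
termination_by (end_ + 1 - start).toNat
decreasing_by
  · have := PySem.Int.floordiv_two_mid_bounds h; omega
  · have := PySem.Int.floordiv_two_mid_bounds h; omega

def monsplit_alt (mon : List Int) (m : Int) (start : Int) (end_ : Int) : Int :=
  let xs := PySem.List.sorted mon (fun x => x) false
  monsplitAltGo xs (prefixSums xs) xs.length m start end_

-- ===== PRECONDITION & SPEC =====
def Spec_monsplit (mon : List Int) (m : Int) (start : Int) (end_ : Int) (out : Int) : Prop := out = monsplit_alt mon m start end_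
instance (mon : List Int) (m : Int) (start : Int) (end_ : Int) (out : Int) : Decidable (Spec_monsplit mon m start end_ out) := by unfold Spec_monsplit; infer_instance

-- ===== CLAIM (what is proved, stated in full; the proofs are below) =====
def Claim_equal_monsplit : Prop := ∀ (mon : List Int) (m : Int) (start : Int) (end_ : Int), Dom_monsplit mon m start end_ → Spec_monsplit mon m start end_ (monsplit mon m start end_)

-- ===== LEMMAS AND PROOFS =====

-- monotone getD access on a (≤)-sorted list
lemma getD_mono_of_pairwise (xs : List Int) (hs : xs.Pairwise (· ≤ ·))
    {i j : Nat} (hij : i ≤ j) (hj : j < xs.length) :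
    xs.getD i 0 ≤ xs.getD j 0 := by
  rcases eq_or_lt_of_le hij with rfl | hlt
  · exact le_refl _
  · have hi : i < xs.length := lt_trans hlt hj
    rw [List.getD_eq_getElem _ _ hi, List.getD_eq_getElem _ _ hj]
    exact (List.pairwise_iff_getElem.mp hs) i j hi hj hlt

-- bisect invariant: result k keeps everything below k ≤ mid and everything from k on > mid
lemma bisectGo_spec (xs : List Int) (mid : Int) (hs : xs.Pairwise (· ≤ ·)) :
    ∀ fuel lo hi, hi - lo ≤ fuel → lo ≤ hi → hi ≤ xs.length →
    (∀ j, j < lo → xs.getD j 0 ≤ mid) →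
    (∀ j, hi ≤ j → j < xs.length → mid < xs.getD j 0) →
    let k := bisectGo xs mid lo hi
    lo ≤ k ∧ k ≤ hi ∧ (∀ j, j < k → xs.getD j 0 ≤ mid) ∧
      (∀ j, k ≤ j → j < xs.length → mid < xs.getD j 0) := by
  intro fuel
  induction fuel with
  | zero =>
    intro lo hi hf hlh _ hlow hhigh
    have : hi = lo := by omega
    subst this
    rw [bisectGo]; simp only [lt_irrefl, if_false]
    exact ⟨le_refl _, le_refl _, hlow, hhigh⟩
  | succ f ih =>
    intro lo hi hf hlh hhl hlow hhigh
    rw [bisectGo]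
    by_cases hcmp : lo < hi
    · simp only [hcmp, if_true]
      set h := (lo + hi) / 2 with hh
      have hb : lo ≤ h ∧ h < hi := by omega
      by_cases hx : xs.getD h 0 ≤ mid
      · simp only [hx, if_true]
        have := ih (h + 1) hi (by omega) (by omega) hhl
          (fun j hj => le_trans (getD_mono_of_pairwise xs hs (by omega) (by omega)) hx)
          hhigh
        exact ⟨by omega, this.2.1, this.2.2⟩
      · simp only [hx, if_false]
        push Not at hx
        have := ih lo h (by omega) (by omega) (by omega) hlow
          (fun j hj hj' => lt_of_lt_of_le hx (getD_mono_of_pairwise xs hs hj hj'))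
        exact ⟨this.1, by omega, this.2.2⟩
    · simp only [hcmp, if_false]
      have : hi = lo := by omega
      subst this
      exact ⟨le_refl _, le_refl _, hlow, hhigh⟩

-- running-sum scan used to characterise prefixSums
def scanSums (s : Int) : List Int → List Int
  | [] => []
  | x :: t => (s + x) :: scanSums (s + x) t

lemma prefixSums_foldl (xs : List Int) :
    ∀ pre s, (xs.foldl (fun (p : List Int × Int) x => (p.1 ++ [p.2 + x], p.2 + x)) (pre, s)).1
      = pre ++ scanSums s xs := by
  induction xs with
  | nil => intro pre s; simp [scanSums]
  | cons x t ih =>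
    intro pre s
    simp only [List.foldl_cons, scanSums]
    rw [ih]
    simp

lemma scanSums_getD (xs : List Int) :
    ∀ s k, k < xs.length → (scanSums s xs).getD k 0 = s + (xs.take (k + 1)).sum := by
  induction xs with
  | nil => intro s k hk; simp at hk
  | cons x t ih =>
    intro s k hk
    cases k with
    | zero => simp [scanSums]
    | succ j =>
      simp only [scanSums, List.getD_cons_succ, List.take_succ_cons, List.sum_cons]
      rw [ih (s + x) j (by simpa using hk)]
      ring

lemma prefixSums_getD (xs : List Int) (k : Nat) (hk : k ≤ xs.length) :
    (prefixSums xs).getD k 0 = (xs.take k).sum := by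
  unfold prefixSums
  rw [prefixSums_foldl xs [0] 0]
  cases k with
  | zero => simp
  | succ j =>
    have hj : j < xs.length := by omega
    simp only [List.cons_append, List.nil_append, List.getD_cons_succ]
    rw [scanSums_getD xs 0 j hj]
    simp

-- the capped sum as a map-sum
lemma cappedSum_eq_map_sum (l : List Int) (mid : Int) :
    l.foldl (fun t i => t + min i mid) 0 = (l.map (fun i => min i mid)).sum := by
  have := PySem.List.foldl_add (l := l) (g := fun i => min i mid) (a := 0)
  simpa using this

-- the single probe: B's prefix/bisect formula computes A's capped sum
lemma probe_eq (mon : List Int) (mid : Int) :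
    let xs := PySem.List.sorted mon (fun x => x) false
    (prefixSums xs).getD (bisectGo xs mid 0 xs.length) 0
      + ((xs.length : Int) - (bisectGo xs mid 0 xs.length : Int)) * mid
      = mon.foldl (fun t i => t + min i mid) 0 := by
  intro xs
  have hperm : xs.Perm mon := PySem.List.sorted_perm mon (fun x => x) false
  have hs : xs.Pairwise (· ≤ ·) := by
    have := PySem.List.sorted_pairwise (xs := mon) (key := fun x => x)
    simpa using this
  obtain ⟨-, hk, hlow, hhigh⟩ := bisectGo_spec xs mid hs xs.length 0 xs.length
    (by omega) (by omega) (le_refl _) (by omega) (by omega)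
  set k := bisectGo xs mid 0 xs.length with hkdef
  rw [cappedSum_eq_map_sum]
  have hsum : (mon.map (fun i => min i mid)).sum = (xs.map (fun i => min i mid)).sum :=
    (hperm.map _).sum_eq.symm
  rw [hsum, prefixSums_getD xs k hk]
  -- split xs into take k ++ drop k
  conv_rhs => rw [← List.take_append_drop k xs]
  rw [List.map_append, List.sum_append]
  have htake : (xs.take k).map (fun i => min i mid) = xs.take k := by
    have hcg : ∀ x ∈ xs.take k, min x mid = id x := by
      intro x hx
      obtain ⟨i, hi, rfl⟩ := List.getElem_of_mem hx
      have hib : i < k ∧ i < xs.length := by simpa [List.length_take] using hi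
      have hik : i < k := hib.1
      have hixs : i < xs.length := hib.2
      have hle : xs.getD i 0 ≤ mid := hlow i hik
      rw [List.getElem_take]
      simp only [id, min_eq_left_iff]
      rwa [List.getD_eq_getElem xs 0 hixs] at hle
    rw [List.map_congr_left hcg, List.map_id]
  have hdrop : (xs.drop k).map (fun i => min i mid) = List.replicate (xs.length - k) mid := by
    rw [List.eq_replicate_iff]
    constructor
    · simp
    · intro b hb
      obtain ⟨x, hx, rfl⟩ := List.mem_map.mp hb
      obtain ⟨i, hi, rfl⟩ := List.getElem_of_mem hx
      have hlen : i < xs.length - k := by simpa using hi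
      have : mid < xs.getD (k + i) 0 := hhigh (k + i) (by omega) (by omega)
      rw [List.getElem_drop]
      rw [List.getD_eq_getElem xs 0 (by omega)] at this
      simp only [min_eq_right_iff]
      omega
  rw [htake, hdrop, List.sum_replicate, nsmul_eq_mul, Nat.cast_sub hk]

-- both while loops agree step for step once every probe agrees
lemma go_eq (mon : List Int) (m : Int) :
    ∀ fuel start end_, (end_ + 1 - start).toNat ≤ fuel →
    monsplitGo mon m start end_
      = monsplitAltGo (PySem.List.sorted mon (fun x => x) false)
          (prefixSums (PySem.List.sorted mon (fun x => x) false))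
          (PySem.List.sorted mon (fun x => x) false).length m start end_ := by
  intro fuel
  induction fuel with
  | zero =>
    intro start end_ hf
    have h : ¬ start ≤ end_ := by omega
    rw [monsplitGo, monsplitAltGo]
    simp [h]
  | succ f ih =>
    intro start end_ hf
    rw [monsplitGo, monsplitAltGo]
    by_cases h : start ≤ end_
    · simp only [h, dif_pos]
      have hm := PySem.Int.floordiv_two_mid_bounds h
      rw [probe_eq mon (PySem.Int.floordiv (start + end_) 2)]
      by_cases hc : m ≥ mon.foldl (fun t i => t + min i (PySem.Int.floordiv (start + end_) 2)) 0
      · simp only [hc, if_true]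
        exact ih _ _ (by omega)
      · simp only [hc, if_false]
        exact ih _ _ (by omega)
    · simp [h]

-- ===== VERDICT (by name: the statement is the Claim_ definition above) =====
theorem monsplit_spec : Claim_equal_monsplit := by
  intro mon m start end_ _
  unfold Spec_monsplit monsplit monsplit_alt
  exact go_eq mon m ((end_ + 1 - start).toNat) start end_ (le_refl _)
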